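-- pv_equiv track=rewrite | github.com/ghobtr/Learn_english_word | main.py | _fetch_turkish_pron
-- ===== SOURCE A (Python) =====
-- def _fetch_turkish_pron(word):
--     """
--     Generate simple syllabic pronunciation for Turkish word (e.g., 'kitap' -> 'ki-tap').
--     """
--     if not word:
--         return "", None
--     if len(word) <= 2:
--         return word, None
--     parts = [word[i:i+2] for i in range(0, len(word), 2)]
--     pron = '-'.join(part for part in parts if part)
--     return pron, None
-- ===== SOURCE B (Python) =====
-- def _fetch_turkish_pron(word):
--     out = []
--     for i, ch in enumerate(word):
--         if i and i % 2 == 0: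
--             out.append('-')
--         out.append(ch)
--     return ''.join(out), None
-- ===== Notes on version B (the rewrite author's own statement) =====
-- stated objective: simpler
-- what changed: Replaced the empty/short guard chain plus range-based 2-char slice comprehension, emptiness filter and dash-join of chunks with one guard-free enumerate scan that emits a dash before every nonzero even position and joins single characters.
import Mathlib
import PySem

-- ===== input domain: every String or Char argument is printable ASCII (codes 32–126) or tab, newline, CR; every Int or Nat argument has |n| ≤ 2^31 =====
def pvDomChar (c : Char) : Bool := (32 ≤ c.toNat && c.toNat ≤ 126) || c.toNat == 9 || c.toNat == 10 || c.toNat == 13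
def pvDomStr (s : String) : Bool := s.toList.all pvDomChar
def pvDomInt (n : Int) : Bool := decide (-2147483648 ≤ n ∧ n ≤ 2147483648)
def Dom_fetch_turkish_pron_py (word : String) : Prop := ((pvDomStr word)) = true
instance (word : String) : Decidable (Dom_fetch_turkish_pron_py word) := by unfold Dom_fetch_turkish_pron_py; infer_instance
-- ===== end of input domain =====

-- B replaces A's guard chain plus 2-char slice comprehension, emptiness filter and
-- '-'.join with a single guard-free enumerate scan that emits a dash before every
-- nonzero even position; objective: simpler, same cost.

-- ===== PORT A =====
-- literal port of A: empty/short guards, then 2-char slices over range(0, len, 2),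
-- joined with '-' after filtering out falsy (empty) parts
def fetch_turkish_pron_py (word : String) : String × Option String :=
  let cs := word.toList
  if cs = [] then ("", none)
  else if cs.length ≤ 2 then (word, none)
  else
    let parts : List (List Char) :=
      (PySem.List.pyRange 0 (cs.length : Int) 2).map
        (fun i => PySem.Chars.slice cs (some i) (some (i + 2)))
    let pron := PySem.Chars.join ['-'] (parts.filter (fun p => !p.isEmpty))
    (String.ofList pron, none)

-- ===== PORT B =====
-- port of Source B: fold over enumerate(word), out collects 1-char pieces (and dashes),
-- then ''.join(out)
def fetch_turkish_pron_py_alt (word : String) : String × Option String :=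
  let out : List (List Char) :=
    (PySem.List.enumerate word.toList 0).foldl
      (fun acc p =>
        acc ++ ((if p.1 ≠ 0 ∧ PySem.Int.mod p.1 2 = 0 then [['-']] else []) ++ [[p.2]])) []
  (String.ofList (PySem.Chars.join [] out), none)

-- ===== PRECONDITION & SPEC =====
def Spec_fetch_turkish_pron_py (word : String) (out : String × Option String) : Prop := out = fetch_turkish_pron_py_alt word
instance (word : String) (out : String × Option String) : Decidable (Spec_fetch_turkish_pron_py word out) := by unfold Spec_fetch_turkish_pron_py; infer_instance

-- ===== CLAIM (what is proved, stated in full; the proofs are below) =====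
def Claim_equal_fetch_turkish_pron_py : Prop := ∀ (word : String), Dom_fetch_turkish_pron_py word → Spec_fetch_turkish_pron_py word (fetch_turkish_pron_py word)

-- ===== LEMMAS AND PROOFS =====

-- common reference form: dash-separated 2-char groups, as a structural recursion
def pvScan : List Char → List Char
  | [] => []
  | [a] => [a]
  | [a, b] => [a, b]
  | a :: b :: c :: rest => a :: b :: '-' :: pvScan (c :: rest)

-- the list of 2-char chunks of a word
def pvChunks : List Char → List (List Char)
  | [] => []
  | [a] => [[a]]
  | a :: b :: rest => [a, b] :: pvChunks rest

theorem pvChunks_ne_nil (cs : List Char) : ∀ p ∈ pvChunks cs, ¬ p.isEmpty := by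
  induction cs using pvChunks.induct <;> simp_all [pvChunks]

-- A's slice comprehension produces exactly the chunk list
theorem pvMapRange_eq_chunks (cs : List Char) :
    (List.range ((cs.length + 1) / 2)).map (fun k => (cs.drop (2 * k)).take 2) = pvChunks cs := by
  induction cs using pvChunks.induct with
  | case1 => simp [pvChunks]
  | case2 a => simp [pvChunks, List.range_succ]
  | case3 a b rest ih =>
      have h : (( (a :: b :: rest).length + 1) / 2) = ((rest.length + 1) / 2) + 1 := by
        simp; omega
      rw [h, List.range_succ_eq_map, List.map_cons, List.map_map]
      simp only [pvChunks]
      congr 1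

theorem pvParts_eq_chunks (cs : List Char) :
    (PySem.List.pyRange 0 (cs.length : Int) 2).map
      (fun i => PySem.Chars.slice cs (some i) (some (i + 2))) = pvChunks cs := by
  rw [PySem.List.pyRange_of_pos 0 (cs.length : Int) (by norm_num)]
  rw [List.map_map]
  have hcount : (if (0:Int) < (cs.length : Int) then (((cs.length : Int) - 0 + 2 - 1) / 2).toNat else 0)
      = (cs.length + 1) / 2 := by
    split_ifs with h
    · omega
    · omega
  rw [hcount, ← pvMapRange_eq_chunks]
  apply List.map_congr_left
  intro k _
  show PySem.Chars.slice cs (some (0 + 2 * (k : Int))) (some (0 + 2 * (k : Int) + 2)) = _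
  have h1 : (0 : Int) + 2 * (k : Int) = ((2 * k : Nat) : Int) := by push_cast; ring
  rw [h1]
  exact_mod_cast PySem.List.slice_natCast_add cs (2 * k) 2

-- joining the chunks with '-' gives the dash-separated form
theorem pvJoin_chunks_eq_scan (cs : List Char) :
    PySem.Chars.join ['-'] (pvChunks cs) = pvScan cs := by
  induction cs using pvScan.induct with
  | case1 => simp [pvChunks, pvScan, PySem.Chars.join_nil]
  | case2 a => simp [pvChunks, pvScan, PySem.Chars.join_singleton]
  | case3 a b => simp [pvChunks, pvScan, PySem.Chars.join_singleton]
  | case4 a b c rest ih =>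
      show PySem.Chars.join ['-'] ([a, b] :: pvChunks (c :: rest)) = _
      have hp : ∃ p ps, pvChunks (c :: rest) = p :: ps := by
        cases rest with
        | nil => exact ⟨[c], [], rfl⟩
        | cons d u => exact ⟨[c, d], pvChunks u, rfl⟩
      obtain ⟨p, ps, hp⟩ := hp
      rw [hp, PySem.Chars.join_cons_cons, ← hp, ih]
      simp [pvScan]

-- ''.join of a list of pieces is concatenation
theorem pvJoin_nil_eq_flatten (ps : List (List Char)) :
    PySem.Chars.join [] ps = ps.flatten := by
  induction ps with
  | nil => simp [PySem.Chars.join_nil]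
  | cons p ps ih =>
      cases ps with
      | nil => simp [PySem.Chars.join_singleton]
      | cons q rest => rw [PySem.Chars.join_cons_cons, ih]; simp

-- PySem.Int.mod with the positive divisor 2 is Lean's emod
theorem pvMod2 (a : Int) : PySem.Int.mod a 2 = a % 2 := by
  simp [PySem.Int.mod, Int.fmod_eq_emod]

-- flatten distributes over flatMap
theorem pvFlatten_flatMap {α : Type} (g : α → List (List Char)) (l : List α) :
    (l.flatMap g).flatten = l.flatMap (fun x => (g x).flatten) := by
  induction l <;> simp_all

-- the pieces emitted for one character at (nonnegative) index i, flattened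
def pvPiece (p : Int × Char) : List Char :=
  ((if p.1 ≠ 0 ∧ PySem.Int.mod p.1 2 = 0 then [['-']] else []) ++ [[p.2]]).flatten

-- B's scan from an even start index ≥ 2 yields a dash and then the dashed groups
theorem pvFlatMap_enumerate_even (cs : List Char) : ∀ s : Int, 2 ≤ s → PySem.Int.mod s 2 = 0 →
    (PySem.List.enumerate cs s).flatMap pvPiece = if cs = [] then [] else '-' :: pvScan cs := by
  induction cs using pvChunks.induct with
  | case1 => intro s _ _; simp [PySem.List.enumerate_nil]
  | case2 a =>
      intro s hs hm
      rw [PySem.List.enumerate_cons, PySem.List.enumerate_nil]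
      have h0 : s ≠ 0 := by omega
      have hdvd : (2 : Int) ∣ s := by rw [pvMod2] at hm; omega
      simp [pvPiece, pvScan, h0, hdvd]
  | case3 a b rest ih =>
      intro s hs hm
      rw [PySem.List.enumerate_cons, PySem.List.enumerate_cons]
      have h0 : s ≠ 0 := by omega
      have hm' : s % 2 = 0 := by rw [pvMod2] at hm; exact hm
      have h2 : PySem.Int.mod (s + 1 + 1) 2 = 0 := by rw [pvMod2]; omega
      have hdvd : (2 : Int) ∣ s := by omega
      have e1 : pvPiece (s, a) = ['-', a] := by simp [pvPiece, h0, hdvd]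
      have e2 : pvPiece (s + 1, b) = [b] := by
        have hodd : (s + 1) % 2 ≠ 0 := by omega
        simp [pvPiece, hodd]
      rw [List.flatMap_cons, List.flatMap_cons, ih (s + 1 + 1) (by omega) h2, e1, e2]
      cases rest with
      | nil => simp [pvScan]
      | cons c t => simp [pvScan]

-- B's whole scan is the dash-separated form
theorem pvFlatMap_enumerate_zero (cs : List Char) :
    (PySem.List.enumerate cs 0).flatMap pvPiece = pvScan cs := by
  cases cs with
  | nil => simp [PySem.List.enumerate_nil, pvScan]
  | cons a rest =>
      rw [PySem.List.enumerate_cons, List.flatMap_cons]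
      cases rest with
      | nil => simp [PySem.List.enumerate_nil, pvPiece, pvScan]
      | cons b rest' =>
          rw [PySem.List.enumerate_cons, List.flatMap_cons]
          have e0 : pvPiece (0, a) = [a] := by simp [pvPiece]
          have e1 : pvPiece ((0 : Int) + 1, b) = [b] := by simp [pvPiece]
          rw [pvFlatMap_enumerate_even rest' (0 + 1 + 1) (by omega) (by rw [pvMod2]; norm_num), e0, e1]
          cases rest' with
          | nil => simp [pvScan]
          | cons c t => simp [pvScan]

-- B's port computes the dash-separated form
theorem pvAlt_eq_scan (word : String) :
    fetch_turkish_pron_py_alt word = (String.ofList (pvScan word.toList), none) := by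
  unfold fetch_turkish_pron_py_alt
  dsimp only
  rw [PySem.List.foldl_append_eq_flatMap
        (fun p => (if p.1 ≠ 0 ∧ PySem.Int.mod p.1 2 = 0 then [['-']] else []) ++ [[p.2]])
        (PySem.List.enumerate word.toList 0) []]
  rw [List.nil_append, pvJoin_nil_eq_flatten, pvFlatten_flatMap _ (PySem.List.enumerate word.toList 0)]
  rw [show (fun p => (((if p.1 ≠ 0 ∧ PySem.Int.mod p.1 2 = 0 then [['-']] else []) ++ [[p.2]]).flatten : List Char)) = pvPiece from rfl]
  rw [pvFlatMap_enumerate_zero]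

-- ===== VERDICT (by name: the statement is the Claim_ definition above) =====
theorem fetch_turkish_pron_py_spec : Claim_equal_fetch_turkish_pron_py := by
  intro word _
  unfold Spec_fetch_turkish_pron_py
  rw [pvAlt_eq_scan]
  unfold fetch_turkish_pron_py
  dsimp only
  by_cases hnil : word.toList = []
  · rw [if_pos hnil, hnil]
    simp [pvScan]
  · rw [if_neg hnil]
    by_cases hlen : word.toList.length ≤ 2
    · rw [if_pos hlen]
      have hscan : pvScan word.toList = word.toList := by
        match word.toList, hlen with
        | [], _ => rfl
        | [a], _ => rfl
        | [a, b], _ => rfl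
        | a :: b :: c :: t, h => simp at h
      rw [hscan, String.ofList_toList]
    · rw [if_neg hlen]
      have hf : (((PySem.List.pyRange 0 (word.toList.length : Int) 2).map
            (fun i => PySem.Chars.slice word.toList (some i) (some (i + 2)))).filter
              (fun p => !p.isEmpty)) = pvChunks word.toList := by
        rw [pvParts_eq_chunks]
        apply List.filter_eq_self.mpr
        intro p hp
        simpa using pvChunks_ne_nil word.toList p hp
      rw [hf, pvJoin_chunks_eq_scan]
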